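-- pv_equiv track=rewrite | github.com/dsweet99/dryer | test/benchmark_data/module_023.py | compute_23_12
-- ===== SOURCE A (Python) =====
-- def compute_23_12(a, b, c):
--     x = a * 428 + b * 385
--     y = c * 316 - a * 297
--     for i in range(20):
--         x = x + i * 82
--         y = y - i * 48
--         if x > 7420:
--             x = x % 2210
--     return x + y + 277
-- ===== SOURCE B (Python) =====
-- def compute_23_12(a, b, c):
--     # Event-jump algorithm: instead of stepping all 20 iterations, use the
--     # closed-form prefix sum P(k) = sum_{j<k} j*82 = 41*k*(k-1) to jump
--     # directly to the next iteration where x would exceed 7420 (found by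
--     # binary search over the monotone prefix sums), apply the modulo there,
--     # and repeat.  y never affects the branch, so it is the closed form
--     # c*316 - a*297 - 9120 (the 48-arithmetic-series total).
--     def P(k):
--         return 41 * k * (k - 1)
--     x = a * 428 + b * 385
--     i = 0
--     while i < 20:
--         total = x + P(20) - P(i)
--         if total <= 7420:
--             x = total
--             i = 20
--         else:
--             lo, hi = i + 1, 20
--             while lo < hi:
--                 mid = (lo + hi) // 2
--                 if x + P(mid) - P(i) > 7420:
--                     hi = mid
--                 else:
--                     lo = mid + 1
--             x = (x + P(lo) - P(i)) % 2210
--             i = lo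
--     return x + (c * 316 - a * 297 - 9120) + 277
-- ===== Notes on version B (the rewrite author's own statement) =====
-- stated objective: alternative
-- what changed: B replaces the 20-step accumulation by an event-jump algorithm: with the closed-form prefix sum P(k)=41k(k-1) it binary-searches the next iteration where x would exceed 7420, jumps there in one arithmetic step, applies the modulo, and repeats; y is the closed form c*316-a*297-9120.
import Mathlib
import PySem

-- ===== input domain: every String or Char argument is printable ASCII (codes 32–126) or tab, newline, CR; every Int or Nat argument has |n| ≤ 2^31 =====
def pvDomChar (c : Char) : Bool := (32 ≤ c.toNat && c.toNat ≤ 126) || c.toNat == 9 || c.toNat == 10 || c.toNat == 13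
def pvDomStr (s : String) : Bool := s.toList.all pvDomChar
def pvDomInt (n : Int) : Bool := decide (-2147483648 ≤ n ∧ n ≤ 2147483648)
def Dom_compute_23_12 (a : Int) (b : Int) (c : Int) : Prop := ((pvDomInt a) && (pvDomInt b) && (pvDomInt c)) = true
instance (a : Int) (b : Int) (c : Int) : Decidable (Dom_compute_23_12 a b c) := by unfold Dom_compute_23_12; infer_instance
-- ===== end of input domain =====

-- B replaces A's 20-step loop by an event-jump algorithm: using the closed-form prefix sum
-- P(k) = 41*k*(k-1) it jumps (via binary search) straight to the next iteration where x
-- exceeds 7420, applies the modulo there, and repeats; y is the closed form c*316-a*297-9120.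

-- ===== PORT A =====
-- one loop step of A over state (x, y)
def pvStepA (s : Int × Int) (i : Int) : Int × Int :=
  let x := s.1 + i * 82
  let y := s.2 - i * 48
  if x > 7420 then (PySem.Int.mod x 2210, y) else (x, y)

def compute_23_12 (a : Int) (b : Int) (c : Int) : Int :=
  let x := a * 428 + b * 385
  let y := c * 316 - a * 297
  let s := (PySem.List.pyRange 0 20 1).foldl pvStepA (x, y)
  s.1 + s.2 + 277

-- ===== PORT B =====
-- P(k) = 41*k*(k-1) = sum of j*82 for j < k
def pvP (k : Int) : Int := 41 * k * (k - 1)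

-- inner binary search of B: smallest k in [lo, hi] with x + P(k) - pi > 7420.
-- The Nat argument is fuel, a pure totality guard: the gap hi - lo (≤ 19 at every call
-- B makes) shrinks by at least 1 per step, so fuel 20 never runs out.
def pvBisect (x pi : Int) : Nat → Int → Int → Int
  | 0, lo, _hi => lo
  | f + 1, lo, hi =>
    if lo < hi then
      let mid := PySem.Int.floordiv (lo + hi) 2
      if 7420 < x + pvP mid - pi then pvBisect x pi f lo mid
      else pvBisect x pi f (mid + 1) hi
    else lo

-- outer while-loop of B, iterations i..19 block by block; the Nat argument is fuel,
-- a totality guard (i strictly increases, so fuel 20 from i = 0 never runs out)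
def pvJump : Nat → Int → Int → Int
  | 0, x, _i => x
  | f + 1, x, i =>
    if i < 20 then
      let total := x + pvP 20 - pvP i
      if total ≤ 7420 then total
      else
        let k := pvBisect x (pvP i) 20 (i + 1) 20
        pvJump f (PySem.Int.mod (x + pvP k - pvP i) 2210) k
    else x

def compute_23_12_alt (a : Int) (b : Int) (c : Int) : Int :=
  pvJump 20 (a * 428 + b * 385) 0 + (c * 316 - a * 297 - 9120) + 277

-- ===== PRECONDITION & SPEC =====
def Spec_compute_23_12 (a : Int) (b : Int) (c : Int) (out : Int) : Prop := out = compute_23_12_alt a b c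
instance (a : Int) (b : Int) (c : Int) (out : Int) : Decidable (Spec_compute_23_12 a b c out) := by unfold Spec_compute_23_12; infer_instance

-- ===== CLAIM =====
def Claim_equal_compute_23_12 : Prop := ∀ (a : Int) (b : Int) (c : Int), Dom_compute_23_12 a b c → Spec_compute_23_12 a b c (compute_23_12 a b c)

-- ===== LEMMAS AND PROOFS =====
-- the x-component of A's step, used only by the proofs
def pvStep1 (x i : Int) : Int :=
  let x' := x + i * 82
  if x' > 7420 then PySem.Int.mod x' 2210 else x'

theorem pvFold_split (l : List Int) (x y : Int) :
    l.foldl pvStepA (x, y) = (l.foldl pvStep1 x, y - (l.map (· * 48)).sum) := by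
  induction l generalizing x y with
  | nil => simp
  | cons i t ih =>
    simp only [List.foldl_cons, List.map_cons, List.sum_cons, pvStepA, pvStep1]
    split <;> rw [ih] <;> ring_nf

theorem pvMid_bounds (lo hi : Int) (h : lo < hi) :
    lo ≤ PySem.Int.floordiv (lo + hi) 2 ∧ PySem.Int.floordiv (lo + hi) 2 < hi := by
  constructor
  · rw [PySem.Int.le_floordiv_iff_mul_le (by omega : (0:Int) < 2)]; omega
  · rw [PySem.Int.floordiv_lt_iff_lt_mul (by omega : (0:Int) < 2)]; omega

theorem pvP_mono (u v : Int) (hu : 0 ≤ u) (huv : u ≤ v) : pvP u ≤ pvP v := by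
  unfold pvP
  by_cases hv : v = 0
  · have hu0 : u = 0 := by omega
    simp [hv, hu0]
  · nlinarith [mul_nonneg (by omega : (0:Int) ≤ v - u) (by omega : (0:Int) ≤ v + u - 1)]

-- a run of steps with no modulo: fold = plain prefix-sum jump
theorem pvRun_nomod (n : Nat) : ∀ (i x : Int), 0 ≤ i →
    x + pvP (i + n) - pvP i ≤ 7420 →
    (PySem.List.pyRange i (i + n) 1).foldl pvStep1 x = x + pvP (i + n) - pvP i := by
  induction n with
  | zero => intro i x _ _; rw [PySem.List.pyRange_one_eq_nil (by omega)]; simp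
  | succ n ih =>
    intro i x hi hle
    rw [PySem.List.pyRange_one_cons (by push_cast; omega)]
    have hstep : x + i * 82 ≤ 7420 := by
      have h1 : pvP (i + 1) ≤ pvP (i + (n + 1 : Nat)) :=
        pvP_mono (i + 1) (i + (n + 1 : Nat)) (by omega) (by push_cast; omega)
      have h2 : pvP (i + 1) - pvP i = i * 82 := by unfold pvP; ring
      omega
    have hs : pvStep1 x i = x + i * 82 := by
      simp only [pvStep1]
      rw [if_neg (by omega : ¬ (7420 : Int) < x + i * 82)]
    have harr : i + (n + 1 : Nat) = (i + 1) + (n : Nat) := by push_cast; ring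
    rw [List.foldl_cons, hs, harr]
    rw [ih (i + 1) (x + i * 82) (by omega)
      (by have h2 : pvP (i + 1) - pvP i = i * 82 := by unfold pvP; ring
          rw [← harr]; omega)]
    have h2 : pvP (i + 1) - pvP i = i * 82 := by unfold pvP; ring
    rw [← harr]; omega

-- a block ending with the modulo at step k-1
theorem pvRun_block (i k x : Int) (hi : 0 ≤ i) (hik : i < k)
    (hmin : k = i + 1 ∨ x + pvP (k - 1) - pvP i ≤ 7420)
    (hgt : 7420 < x + pvP k - pvP i) :
    (PySem.List.pyRange i k 1).foldl pvStep1 x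
      = PySem.Int.mod (x + pvP k - pvP i) 2210 := by
  have hsplit : PySem.List.pyRange i k 1 = PySem.List.pyRange i (k - 1) 1 ++ [k - 1] := by
    have h1 : i ≤ k - 1 := by omega
    have := PySem.List.pyRange_one_succ_right h1
    simpa using this
  have hv : (PySem.List.pyRange i (k - 1) 1).foldl pvStep1 x = x + pvP (k - 1) - pvP i := by
    rcases hmin with h1 | h2
    · rw [h1]; simp only [add_sub_cancel_right]
      rw [PySem.List.pyRange_one_eq_nil (by omega)]; simp
    · have hn : k - 1 = i + ((k - 1 - i).toNat : Int) := by omega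
      rw [hn] at h2 ⊢
      exact pvRun_nomod (k - 1 - i).toNat i x hi h2
  rw [hsplit, List.foldl_append, hv, List.foldl_cons, List.foldl_nil]
  unfold pvStep1
  have harith : x + pvP (k - 1) - pvP i + (k - 1) * 82 = x + pvP k - pvP i := by
    unfold pvP; ring
  rw [harith, if_pos hgt]

-- with enough fuel, the binary search finds the least k in [lo, hi] past the threshold
theorem pvBisect_spec (x pi : Int) (f : Nat) : ∀ (lo hi : Int), lo ≤ hi →
    (hi - lo).toNat ≤ f → 7420 < x + pvP hi - pi →
    lo ≤ pvBisect x pi f lo hi ∧ pvBisect x pi f lo hi ≤ hi ∧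
    7420 < x + pvP (pvBisect x pi f lo hi) - pi ∧
    (lo < pvBisect x pi f lo hi → x + pvP (pvBisect x pi f lo hi - 1) - pi ≤ 7420) := by
  induction f with
  | zero =>
    intro lo hi hlh hf hhi
    have : lo = hi := by omega
    subst this
    exact ⟨le_refl _, le_refl _, by simpa [pvBisect] using hhi, by simp [pvBisect]⟩
  | succ f ih =>
    intro lo hi hlh hf hhi
    by_cases h : lo < hi
    · have hm := pvMid_bounds lo hi h
      simp only [pvBisect, if_pos h]
      by_cases hc : 7420 < x + pvP (PySem.Int.floordiv (lo + hi) 2) - pi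
      · rw [if_pos hc]
        obtain ⟨h1, h2, h3, h4⟩ := ih lo (PySem.Int.floordiv (lo + hi) 2) (by omega) (by omega) hc
        exact ⟨h1, by omega, h3, h4⟩
      · rw [if_neg hc]
        obtain ⟨h1, h2, h3, h4⟩ := ih (PySem.Int.floordiv (lo + hi) 2 + 1) hi (by omega) (by omega) hhi
        refine ⟨by omega, h2, h3, ?_⟩
        intro _
        by_cases he : PySem.Int.floordiv (lo + hi) 2 + 1 < pvBisect x pi f (PySem.Int.floordiv (lo + hi) 2 + 1) hi
        · exact h4 he
        · have hr : pvBisect x pi f (PySem.Int.floordiv (lo + hi) 2 + 1) hi = PySem.Int.floordiv (lo + hi) 2 + 1 := by omega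
          rw [hr]
          simpa using hc
    · have : lo = hi := by omega
      subst this
      simp only [pvBisect, if_neg h]
      exact ⟨le_refl _, le_refl _, hhi, by omega⟩

-- the whole fold over iterations i..19 equals the fueled event-jump loop
theorem pvMain (N : Nat) : ∀ (i x : Int), 0 ≤ i → i ≤ 20 → (20 - i).toNat ≤ N →
    (PySem.List.pyRange i 20 1).foldl pvStep1 x = pvJump N x i := by
  induction N with
  | zero =>
    intro i x _ _ hN
    have : i = 20 := by omega
    subst this
    rw [PySem.List.pyRange_one_eq_nil (by omega)]
    simp [pvJump]
  | succ N ih =>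
    intro i x hi h20 hN
    by_cases hlt : i < 20
    · simp only [pvJump, if_pos hlt]
      by_cases htot : x + pvP 20 - pvP i ≤ 7420
      · rw [if_pos htot]
        have hn : (20 : Int) = i + ((20 - i).toNat : Int) := by omega
        calc (PySem.List.pyRange i 20 1).foldl pvStep1 x
            = (PySem.List.pyRange i (i + ((20 - i).toNat : Int)) 1).foldl pvStep1 x := by rw [← hn]
          _ = x + pvP (i + ((20 - i).toNat : Int)) - pvP i :=
              pvRun_nomod (20 - i).toNat i x hi (by rw [← hn]; exact htot)
          _ = x + pvP 20 - pvP i := by rw [← hn]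
      · rw [if_neg htot]
        obtain ⟨hk1, hk2, hk3, hk4⟩ :=
          pvBisect_spec x (pvP i) 20 (i + 1) 20 (by omega) (by omega) (by omega)
        set k := pvBisect x (pvP i) 20 (i + 1) 20 with hk
        have hmin : k = i + 1 ∨ x + pvP (k - 1) - pvP i ≤ 7420 := by
          by_cases he : i + 1 < k
          · exact Or.inr (hk4 he)
          · exact Or.inl (by omega)
        rw [PySem.List.pyRange_one_append i k 20 (by omega) hk2, List.foldl_append]
        rw [pvRun_block i k x hi (by omega) hmin hk3]
        exact ih k _ (by omega) hk2 (by omega)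
    · have : i = 20 := by omega
      subst this
      rw [PySem.List.pyRange_one_eq_nil (by omega)]
      simp [pvJump]

-- ===== VERDICT =====
theorem compute_23_12_spec : Claim_equal_compute_23_12 := by
  intro a b c _
  unfold Spec_compute_23_12 compute_23_12 compute_23_12_alt
  simp only [pvFold_split]
  have hsum : ((PySem.List.pyRange 0 20 1).map (· * 48)).sum = 9120 := by decide
  rw [hsum, pvMain 20 0 (a * 428 + b * 385) (by omega) (by omega) (by omega)]
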